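-- pv_equiv track=rewrite | github.com/gthcon/streaming-log-compression | test_logs/drain_smart.py | get_line_delta
-- ===== SOURCE A (Python) =====
-- def get_line_delta(template, line):
--     parts = template.split('<*>')
--     if len(parts) == 1:
--         return [] if template == line else [line]
--     variables = []
--     remaining = line
--     for part in parts:
--         if not part:
--             continue
--         idx = remaining.find(part)
--         if idx == -1:
--             return [line]
--         if idx > 0:
--             variables.append(remaining[:idx])
--         remaining = remaining[idx + len(part):]
--     if remaining:
--         variables.append(remaining)
--     return variables
-- ===== SOURCE B (Python) =====
-- def _match(parts, remaining):
--     if not parts: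
--         return [remaining] if remaining else []
--     pre, sep, post = remaining.partition(parts[0])
--     if not sep:
--         return None
--     rest = _match(parts[1:], post)
--     if rest is None:
--         return None
--     return [pre] + rest if pre else rest
--
--
-- def get_line_delta(template, line):
--     parts = template.split('<*>')
--     if len(parts) == 1:
--         return [] if template == line else [line]
--     res = _match([p for p in parts if p], line)
--     return [line] if res is None else res
-- ===== Notes on version B (the rewrite author's own statement) =====
-- stated objective: alternative
-- what changed: Replaces A's accumulator loop over all split parts (with continue on empty parts, early return, and a trailing-remainder append) by a recursive matcher over the pre-filtered non-empty parts that uses str.partition, signals failure with None, and assembles the variable list back-to-front.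
import Mathlib
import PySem

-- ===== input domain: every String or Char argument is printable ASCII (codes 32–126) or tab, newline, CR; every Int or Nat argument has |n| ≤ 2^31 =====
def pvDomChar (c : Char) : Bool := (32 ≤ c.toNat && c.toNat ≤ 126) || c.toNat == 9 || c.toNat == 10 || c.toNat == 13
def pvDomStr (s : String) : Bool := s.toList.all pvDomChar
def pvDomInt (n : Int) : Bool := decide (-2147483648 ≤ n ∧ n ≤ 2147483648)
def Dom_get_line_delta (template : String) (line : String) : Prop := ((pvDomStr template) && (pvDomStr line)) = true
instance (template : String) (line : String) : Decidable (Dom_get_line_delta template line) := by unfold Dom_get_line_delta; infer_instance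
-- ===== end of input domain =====

-- B replaces A's accumulator loop over all parts by a recursive matcher over the
-- pre-filtered non-empty parts that builds the variable list back-to-front and signals
-- failure with None (objective: alternative decomposition, same cost).

-- ===== PORT A =====
-- A's for-loop over parts, carrying (varsAcc, remaining); 'continue' on an empty part,
-- early 'return [line]' when find fails.  remaining[:idx] / remaining[idx+len(part):]
-- are take/drop — exact here, since both bounds are ≥ 0.
def pvLoopA (line : List Char) : List (List Char) → List (List Char) → List Char → List (List Char)
  | [], varsAcc, remaining =>
      if remaining = [] then varsAcc else varsAcc ++ [remaining]
  | part :: rest, varsAcc, remaining =>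
      if part = [] then pvLoopA line rest varsAcc remaining
      else
        let idx := PySem.Chars.find remaining part
        if idx = -1 then [line]
        else pvLoopA line rest
          (if idx > 0 then varsAcc ++ [remaining.take idx.toNat] else varsAcc)
          (remaining.drop (idx.toNat + part.length))

def get_line_delta (template : String) (line : String) : List String :=
  let parts := PySem.Chars.splitOn template.toList "<*>".toList
  if parts.length = 1 then (if template.toList = line.toList then [] else [line])
  else (pvLoopA line.toList parts [] line.toList).map String.ofList

-- ===== PORT B =====
-- B's _match: recursion over the (already non-empty) parts; str.partition is ported via
-- find/take/drop, exact for a non-empty separator ('not sep' ↔ find = -1).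
def pvMatchB : List (List Char) → List Char → Option (List (List Char))
  | [], remaining => some (if remaining = [] then [] else [remaining])
  | part :: rest, remaining =>
      let idx := PySem.Chars.find remaining part
      if idx = -1 then none
      else
        let pre := remaining.take idx.toNat
        let post := remaining.drop (idx.toNat + part.length)
        match pvMatchB rest post with
        | none => none
        | some r => some (if pre = [] then r else pre :: r)

def get_line_delta_alt (template : String) (line : String) : List String :=
  let parts := PySem.Chars.splitOn template.toList "<*>".toList
  if parts.length = 1 then (if template.toList = line.toList then [] else [line])
  else
    match pvMatchB (parts.filter (fun p => !decide (p = []))) line.toList with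
    | none => [line]
    | some vs => vs.map String.ofList

-- ===== PRECONDITION & SPEC =====
def Spec_get_line_delta (template : String) (line : String) (out : List String) : Prop := out = get_line_delta_alt template line
instance (template : String) (line : String) (out : List String) : Decidable (Spec_get_line_delta template line out) := by unfold Spec_get_line_delta; infer_instance

-- ===== CLAIM (what is proved, stated in full; the proofs are below) =====
def Claim_equal_get_line_delta : Prop := ∀ (template : String) (line : String), Dom_get_line_delta template line → Spec_get_line_delta template line (get_line_delta template line)

-- ===== LEMMAS AND PROOFS =====

-- A's loop on any tail of parts equals B's matcher on that tail's non-empty parts.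
lemma pvLoopA_eq_pvMatchB (line : List Char) (ps : List (List Char)) :
    ∀ (varsAcc : List (List Char)) (remaining : List Char),
      pvLoopA line ps varsAcc remaining =
        match pvMatchB (ps.filter (fun p => !decide (p = []))) remaining with
        | none => [line]
        | some r => varsAcc ++ r := by
  induction ps with
  | nil =>
      intro varsAcc remaining
      simp [pvLoopA, pvMatchB]
      split_ifs <;> simp
  | cons part rest ih =>
      intro varsAcc remaining
      by_cases hp : part = []
      · simp [pvLoopA, hp, ih varsAcc remaining]
      · simp only [pvLoopA, hp, if_false, List.filter_cons,
          Bool.not_eq_eq_eq_not, Bool.not_true]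
        by_cases hidx : PySem.Chars.find remaining part = -1
        · simp [pvMatchB, hidx]
        · have h0 : 0 ≤ PySem.Chars.find remaining part := by
            have := PySem.Chars.neg_one_le_find remaining part
            omega
          have hlen : PySem.Chars.find remaining part ≤ (remaining.length : Int) :=
            PySem.Chars.find_le_length remaining part
          simp only [hidx, if_false, decide_false, if_true]
          rw [ih _ _]
          simp only [pvMatchB, hidx, if_false]
          cases hrec : pvMatchB (rest.filter (fun p => !decide (p = [])))
              (remaining.drop ((PySem.Chars.find remaining part).toNat + part.length)) with
          | none => simp
          | some r =>
              simp only
              by_cases hpos : 0 < PySem.Chars.find remaining part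
              · have hrem : remaining ≠ [] := by
                  intro h
                  subst h
                  simp at hlen
                  omega
                have hpre : remaining.take (PySem.Chars.find remaining part).toNat ≠ [] := by
                  intro h
                  rcases List.take_eq_nil_iff.mp h with h' | h'
                  · omega
                  · exact hrem h'
                simp [hpos, hpre]
              · have hz : PySem.Chars.find remaining part = 0 := by omega
                simp [hz]

theorem pv_main (template line : String) :
    get_line_delta template line = get_line_delta_alt template line := by
  unfold get_line_delta get_line_delta_alt
  by_cases h1 : (PySem.Chars.splitOn template.toList "<*>".toList).length = 1
  · rw [if_pos h1, if_pos h1]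
  · simp only [h1, if_false]
    rw [pvLoopA_eq_pvMatchB line.toList _ [] line.toList]
    cases hr : pvMatchB ((PySem.Chars.splitOn template.toList "<*>".toList).filter
        (fun p => !decide (p = []))) line.toList with
    | none => simp [String.ofList_toList]
    | some r => simp

-- ===== VERDICT (by name: the statement is the Claim_ definition above) =====
theorem get_line_delta_spec : Claim_equal_get_line_delta := by
  intro template line _
  unfold Spec_get_line_delta
  exact pv_main template line
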